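-- pv_equiv track=rewrite | github.com/CalvinNeo/LeetCode | python/leetcode.2453.py | destroyTargetsM
-- ===== SOURCE A (Python) =====
-- def destroyTargetsM(nums, space):
--     """
--     :type nums: List[int]
--     :type space: int
--     :rtype: int
--     """
--     INF = 99999999999
--     m = [(i, 0, INF) for i in range(space + 1)]
--     for n in nums:
--         mm = n % space
--         if mm == 0:
--             mm = space
--         m[mm] = (m[mm][0], m[mm][1] + 1, min(m[mm][2], n))
--     m.sort(key = lambda x: (x[1], -x[2]))
--     r = m[-1][2]
--     return r
-- ===== SOURCE B (Python) =====
-- def destroyTargetsM(nums, space):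
--     INF = 99999999999
--     counts = {}
--     for n in nums:
--         counts[n % space] = counts.get(n % space, 0) + 1
--     maxc = max((counts[n % space] for n in nums), default=0)
--     return min((n for n in nums if counts[n % space] == maxc), default=INF)
-- ===== Notes on version B (the rewrite author's own statement) =====
-- stated objective: simpler
-- what changed: A builds a bucket array indexed by the (shifted) residue, maintains a per-bucket running min, sorts all buckets by (count, -min) and takes the last; B keeps only a residue->count dictionary, takes the max of the counts over nums and returns the min of the elements of nums lying in a max-count bucket, so no per-bucket min is maintained and nothing is sorted.
import Mathlib
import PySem

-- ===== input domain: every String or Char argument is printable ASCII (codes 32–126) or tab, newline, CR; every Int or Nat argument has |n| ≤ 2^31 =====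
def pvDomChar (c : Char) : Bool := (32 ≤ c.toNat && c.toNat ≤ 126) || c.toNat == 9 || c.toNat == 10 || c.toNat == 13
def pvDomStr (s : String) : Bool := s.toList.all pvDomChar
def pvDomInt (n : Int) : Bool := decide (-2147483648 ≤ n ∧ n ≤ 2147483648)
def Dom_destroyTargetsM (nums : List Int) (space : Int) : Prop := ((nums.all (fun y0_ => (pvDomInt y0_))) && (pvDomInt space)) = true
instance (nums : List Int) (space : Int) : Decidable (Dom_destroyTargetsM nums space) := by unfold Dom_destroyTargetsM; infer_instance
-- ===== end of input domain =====

-- B replaces A's bucket array + sort-and-take-last with a count dictionary, a max, and a filtered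
-- min over nums (objective: simpler; no per-bucket min is maintained and nothing is sorted).

-- ===== PORT A =====
-- the `for n in nums` loop of A; none = the Python raised (ZeroDivisionError / IndexError);
-- pySetA is Python's `m[mm] = v` at a possibly negative index (callers check the index via
-- pyGet? first, so the none branch of pyIdx? is never taken on admitted inputs)
def aLoopA (space : Int) (m : List (Int × Int × Int)) (nums : List Int) :
    Option (List (Int × Int × Int)) :=
  match nums with
  | [] => some m
  | n :: rest =>
    if space = 0 then none
    else
      let mm0 := PySem.Int.mod n space
      let mm := if mm0 = 0 then space else mm0
      match PySem.List.pyGet? m mm with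
      | none => none
      | some e => aLoopA space (pySetA m mm (e.1, e.2.1 + 1, min e.2.2 n)) rest
  where pySetA {α : Type} (xs : List α) (i : Int) (v : α) : List α :=
  match PySem.List.pyIdx? xs.length i with
  | some j => xs.set j v
  | none => xs


def destroyTargetsM (nums : List Int) (space : Int) : Int :=
  match aLoopA space ((PySem.List.pyRange 0 (space + 1)).map (fun i => (i, (0 : Int), (99999999999 : Int)))) nums with
  | none => 0
  | some m =>
    -- m.sort(key=lambda x: (x[1], -x[2])): a stable ascending library sort by the lexicographic
    -- tuple key, ported as the library stable sort List.mergeSort with the same key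
    match PySem.List.pyGet? (m.mergeSort (fun a b =>
        decide ((toLex (a.2.1, -a.2.2) : Lex (Int × Int)) ≤ toLex (b.2.1, -b.2.2)))) (-1) with
    | none => 0
    | some x => x.2.2


-- ===== PORT B =====
def destroyTargetsM_alt (nums : List Int) (space : Int) : Int :=
  let counts := nums.foldl
    (fun d n => d.modify (PySem.Int.mod n space) 0 (· + 1))
    (PySem.Dict.empty : PySem.Dict Int Int)
  let maxc := (PySem.List.max?
    (nums.map (fun n => counts.getD (PySem.Int.mod n space) 0)) (fun v => v)).getD 0
  (PySem.List.min?
    (nums.filter (fun n => counts.getD (PySem.Int.mod n space) 0 == maxc))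
    (fun v => v)).getD 99999999999


-- ===== PRECONDITION & SPEC =====
-- A raises outside this set: for space < 0 every run ends in an IndexError (the bucket list is
-- empty), and for space = 0 with nums ≠ [] the first `n % space` is a ZeroDivisionError.
def Pre_destroyTargetsM (nums : List Int) (space : Int) : Prop :=
  1 ≤ space ∨ (nums = [] ∧ 0 ≤ space)
instance (nums : List Int) (space : Int) : Decidable (Pre_destroyTargetsM nums space) := by
  unfold Pre_destroyTargetsM; infer_instance

def pvWitness_destroyTargetsM : List Int × Int := ([1, 3, 7, 4, 3], 3)

def Spec_destroyTargetsM (nums : List Int) (space : Int) (out : Int) : Prop :=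
  out = destroyTargetsM_alt nums space
instance (nums : List Int) (space : Int) (out : Int) : Decidable (Spec_destroyTargetsM nums space out) := by
  unfold Spec_destroyTargetsM; infer_instance

-- ===== CLAIM (what is proved, stated in full; the proofs are below) =====
def Claim_equal_destroyTargetsM : Prop := ∀ (nums : List Int) (space : Int),
  Dom_destroyTargetsM nums space → Pre_destroyTargetsM nums space →
  Spec_destroyTargetsM nums space (destroyTargetsM nums space)

-- ===== LEMMAS AND PROOFS =====
def pvAdj (space n : Int) : Int :=
  if PySem.Int.mod n space = 0 then space else PySem.Int.mod n space
def pvMrep (space : Int) (c v : Int → Int) : List (Int × Int × Int) :=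
  (PySem.List.pyRange 0 (space + 1)).map (fun j => (j, c j, v j))
lemma length_pyRange01 (b : Int) (hb : 0 ≤ b) :
    ((PySem.List.pyRange 0 b).length : Int) = b := by
  simp only [PySem.List.pyRange]
  split
  · omega
  · split
    · simp; omega
    · simp; omega

lemma pvAdj_bounds (space n : Int) (hs : 1 ≤ space) : 1 ≤ pvAdj space n ∧ pvAdj space n ≤ space := by
  unfold pvAdj
  have h1 := PySem.Int.mod_nonneg n (b := space) (by omega)
  have h2 := PySem.Int.mod_lt n (b := space) (by omega)
  split <;> omega

lemma pvAdj_eq_iff (space m n : Int) (hs : 1 ≤ space) :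
    pvAdj space m = pvAdj space n ↔ PySem.Int.mod m space = PySem.Int.mod n space := by
  unfold pvAdj
  have h1 := PySem.Int.mod_nonneg m (b := space) (by omega)
  have h2 := PySem.Int.mod_lt m (b := space) (by omega)
  have h3 := PySem.Int.mod_nonneg n (b := space) (by omega)
  have h4 := PySem.Int.mod_lt n (b := space) (by omega)
  split_ifs <;> omega

lemma length_pvMrep (space : Int) (c v : Int → Int) (hs : 0 ≤ space) :
    ((pvMrep space c v).length : Int) = space + 1 := by
  simp only [pvMrep, List.length_map]
  exact length_pyRange01 _ (by omega)

lemma getElem_pvMrep (space : Int) (c v : Int → Int) (k : Nat) (h : k < (pvMrep space c v).length) :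
    (pvMrep space c v)[k] = ((k : Int), c k, v k) := by
  simp only [pvMrep, List.getElem_map] at h ⊢
  rw [PySem.List.getElem_pyRange_one]
  simp

lemma pyGet?_pvMrep (space : Int) (c v : Int → Int) (mm : Int)
    (h1 : 0 ≤ mm) (h2 : mm ≤ space) :
    PySem.List.pyGet? (pvMrep space c v) mm = some (mm, c mm, v mm) := by
  have hl := length_pvMrep space c v (by omega)
  have hlt : mm.toNat < (pvMrep space c v).length := by omega
  rw [← Int.toNat_of_nonneg h1, PySem.List.pyGet?_natCast, List.getElem?_eq_getElem hlt,
    getElem_pvMrep]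

lemma pySetA_pvMrep (space : Int) (c v : Int → Int) (mm a b : Int)
    (h1 : 0 ≤ mm) (h2 : mm ≤ space) :
    (pvMrep space c v).set mm.toNat (mm, a, b)
      = pvMrep space (fun j => if j = mm then a else c j) (fun j => if j = mm then b else v j) := by
  have hl := length_pvMrep space c v (by omega)
  apply List.ext_getElem
  · simp [pvMrep]
  · intro k hk hk2
    rw [List.getElem_set]
    rw [getElem_pvMrep]
    split
    · rw [getElem_pvMrep]
      have he : (k:Int) = mm := by omega
      simp [he]
    · rw [getElem_pvMrep]
      have : ¬ ((k:Int) = mm) := by omega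
      simp [this]


lemma pySetA_eq_set {α : Type} (xs : List α) (i : Int) (v : α)
    (h1 : 0 ≤ i) (h2 : i < (xs.length : Int)) :
    aLoopA.pySetA xs i v = xs.set i.toNat v := by
  simp [aLoopA.pySetA, PySem.List.pyIdx?, h1, h2]

lemma aLoopA_inv (space : Int) (hs : 1 ≤ space) :
    ∀ (l : List Int) (c v : Int → Int),
    aLoopA space (pvMrep space c v) l =
      some (pvMrep space
        (fun j => c j + ((l.filter (fun n => pvAdj space n == j)).length : Int))
        (fun j => (l.filter (fun n => pvAdj space n == j)).foldl min (v j))) := by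
  intro l
  induction l with
  | nil => intro c v; simp [aLoopA, pvMrep]
  | cons n rest ih =>
    intro c v
    have hb := pvAdj_bounds space n hs
    have hsp : ¬ (space = 0) := by omega
    rw [aLoopA]
    simp only [hsp, if_false]
    have hadj : (if PySem.Int.mod n space = 0 then space else PySem.Int.mod n space) = pvAdj space n := rfl
    rw [hadj, pyGet?_pvMrep space c v _ (by omega) (by omega)]
    simp only
    have hlen := length_pvMrep space c v (by omega)
    rw [pySetA_eq_set _ _ _ (by omega) (by omega), pySetA_pvMrep space c v _ _ _ (by omega) (by omega)]
    rw [ih]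
    congr 1
    unfold pvMrep
    apply List.map_congr_left
    intro j hj
    rw [PySem.List.mem_pyRange_one] at hj
    by_cases hje : pvAdj space n = j
    · subst hje
      simp only [List.filter_cons, beq_self_eq_true, if_true, List.length_cons,
        List.foldl_cons]
      refine Prod.ext rfl (Prod.ext ?_ rfl)
      push_cast; ring
    · have hpred : (pvAdj space n == j) = false := by simp [hje]
      have hne : ¬ (j = pvAdj space n) := fun h => hje h.symm
      simp only [List.filter_cons, hpred, Bool.false_eq_true, if_false, if_neg hne]

lemma key_le_getLast {α K : Type} [LinearOrder K] (key : α → K) :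
    ∀ (l : List α) (h : l ≠ []), l.Pairwise (fun a b => key a ≤ key b) →
      ∀ x ∈ l, key x ≤ key (l.getLast h) := by
  intro l
  induction l with
  | nil => intro h; exact absurd rfl h
  | cons a t ih =>
    intro h hp x hx
    rcases List.pairwise_cons.mp hp with ⟨ha, hp'⟩
    cases t with
    | nil => simp at hx; subst hx; simp [List.getLast]
    | cons b t2 =>
      rw [List.getLast_cons (by simp)]
      rcases List.mem_cons.mp hx with rfl | hx'
      · exact ha _ (List.getLast_mem (by simp))
      · exact ih (by simp) hp' x hx'

lemma foldl_min_le_init : ∀ (l : List Int) (a : Int), l.foldl min a ≤ a := by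
  intro l
  induction l with
  | nil => intro a; simp
  | cons n t ih =>
    intro a
    calc (n :: t).foldl min a = t.foldl min (min a n) := rfl
      _ ≤ min a n := ih _
      _ ≤ a := min_le_left _ _

lemma foldl_min_le_mem : ∀ (l : List Int) (a x : Int), x ∈ l → l.foldl min a ≤ x := by
  intro l
  induction l with
  | nil => intro a x hx; simp at hx
  | cons n t ih =>
    intro a x hx
    rcases List.mem_cons.mp hx with rfl | hx'
    · exact le_trans (foldl_min_le_init t _) (min_le_right a x)
    · exact ih _ x hx'

lemma foldl_min_mem_or : ∀ (l : List Int) (a : Int), l.foldl min a = a ∨ l.foldl min a ∈ l := by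
  intro l
  induction l with
  | nil => intro a; left; rfl
  | cons n t ih =>
    intro a
    rcases ih (min a n) with h | h
    · rcases le_total a n with hle | hle
      · left; rw [List.foldl_cons, h, min_eq_left hle]
      · right; rw [List.foldl_cons, h, min_eq_right hle]; simp
    · right; exact List.mem_cons_of_mem _ h

def pvC (space : Int) (nums : List Int) (j : Int) : Int :=
  ((nums.filter (fun n => pvAdj space n == j)).length : Int)
def pvV (space : Int) (nums : List Int) (j : Int) : Int :=
  (nums.filter (fun n => pvAdj space n == j)).foldl min 99999999999

lemma counts_getD (nums : List Int) (space r : Int) :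
    (nums.foldl (fun d n => d.modify (PySem.Int.mod n space) 0 (· + 1))
        (PySem.Dict.empty : PySem.Dict Int Int)).getD r 0
      = (((nums.map (fun n => PySem.Int.mod n space)).count r : Nat) : Int) := by
  have h := PySem.Dict.getD_foldl_modify_add_one (nums.map (fun n => PySem.Int.mod n space))
      (PySem.Dict.empty : PySem.Dict Int Int) r
  rw [List.foldl_map] at h
  simpa using h

lemma count_map_mod (nums : List Int) (space r : Int) :
    ((nums.map (fun n => PySem.Int.mod n space)).count r) =
      (nums.filter (fun n => PySem.Int.mod n space == r)).length := by
  simp only [List.count, List.countP_eq_length_filter, List.filter_map, List.length_map]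
  rfl

lemma filter_adj_eq_raw (nums : List Int) (space n : Int) (hs : 1 ≤ space) :
    nums.filter (fun m => pvAdj space m == pvAdj space n)
      = nums.filter (fun m => PySem.Int.mod m space == PySem.Int.mod n space) := by
  apply List.filter_congr
  intro m _
  have hiff := pvAdj_eq_iff space m n hs
  by_cases h : PySem.Int.mod m space = PySem.Int.mod n space
  · simp [h, hiff.mpr h]
  · have : ¬ pvAdj space m = pvAdj space n := fun hh => h (hiff.mp hh)
    simp [h, this]

lemma counts_getD_eq (nums : List Int) (space n : Int) (hs : 1 ≤ space) :
    (nums.foldl (fun d n => d.modify (PySem.Int.mod n space) 0 (· + 1))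
        (PySem.Dict.empty : PySem.Dict Int Int)).getD (PySem.Int.mod n space) 0
      = pvC space nums (pvAdj space n) := by
  rw [counts_getD, count_map_mod]
  unfold pvC
  rw [filter_adj_eq_raw nums space n hs]

lemma A_empty (space : Int) (hs0 : 0 ≤ space) :
    destroyTargetsM [] space = 99999999999 := by
  unfold destroyTargetsM
  have hm0 : ((PySem.List.pyRange 0 (space + 1)).map (fun i => (i, (0 : Int), (99999999999 : Int))))
      = pvMrep space (fun _ => 0) (fun _ => 99999999999) := rfl
  rw [hm0]
  have hrun : aLoopA space (pvMrep space (fun _ => 0) (fun _ => 99999999999)) [] =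
      some (pvMrep space (fun _ => 0) (fun _ => 99999999999)) := rfl
  rw [hrun]
  simp only
  set ms := (pvMrep space (fun _ => 0) (fun _ => 99999999999)).mergeSort (fun a b =>
      decide ((toLex (a.2.1, -a.2.2) : Lex (Int × Int)) ≤ toLex (b.2.1, -b.2.2))) with hms
  have hlen := length_pvMrep space (fun _ => 0) (fun _ => 99999999999) hs0
  have hne : ms ≠ [] := by
    intro h
    have hp := List.mergeSort_perm (l := pvMrep space (fun _ => 0) (fun _ => 99999999999))
      (le := fun a b => decide ((toLex (a.2.1, -a.2.2) : Lex (Int × Int)) ≤ toLex (b.2.1, -b.2.2)))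
    rw [← hms, h] at hp
    rw [← hp.length_eq] at hlen
    simp at hlen
    omega
  rw [PySem.List.pyGet?_neg_one, List.getLast?_eq_some_getLast hne]
  show (ms.getLast hne).2.2 = 99999999999
  have hy : ms.getLast hne ∈ pvMrep space (fun _ => 0) (fun _ => 99999999999) := by
    have hp := List.mergeSort_perm (l := pvMrep space (fun _ => 0) (fun _ => 99999999999))
      (le := fun a b => decide ((toLex (a.2.1, -a.2.2) : Lex (Int × Int)) ≤ toLex (b.2.1, -b.2.2)))
    rw [← hms] at hp
    exact hp.mem_iff.mp (List.getLast_mem hne)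
  rcases List.mem_map.mp hy with ⟨j, _, hj⟩
  rw [← hj]

lemma A_char (nums : List Int) (space : Int) (hs : 1 ≤ space) :
    ∃ jy, 0 ≤ jy ∧ jy ≤ space ∧ destroyTargetsM nums space = pvV space nums jy ∧
      ∀ j, 0 ≤ j → j ≤ space →
        (toLex (pvC space nums j, -pvV space nums j) : Lex (Int × Int))
          ≤ toLex (pvC space nums jy, -pvV space nums jy) := by
  unfold destroyTargetsM
  have hm0 : ((PySem.List.pyRange 0 (space + 1)).map (fun i => (i, (0 : Int), (99999999999 : Int))))
      = pvMrep space (fun _ => 0) (fun _ => 99999999999) := rfl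
  rw [hm0, aLoopA_inv space hs nums]
  have hMr : pvMrep space
        (fun j => 0 + ((nums.filter (fun n => pvAdj space n == j)).length : Int))
        (fun j => (nums.filter (fun n => pvAdj space n == j)).foldl min 99999999999)
      = pvMrep space (pvC space nums) (pvV space nums) := by
    unfold pvMrep pvC pvV
    simp
  rw [hMr]
  simp only
  set ms := (pvMrep space (pvC space nums) (pvV space nums)).mergeSort (fun a b =>
      decide ((toLex (a.2.1, -a.2.2) : Lex (Int × Int)) ≤ toLex (b.2.1, -b.2.2))) with hms
  have hlen := length_pvMrep space (pvC space nums) (pvV space nums) (by omega)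
  have hne : ms ≠ [] := by
    intro h
    have hp := List.mergeSort_perm (l := pvMrep space (pvC space nums) (pvV space nums))
      (le := fun a b => decide ((toLex (a.2.1, -a.2.2) : Lex (Int × Int)) ≤ toLex (b.2.1, -b.2.2)))
    rw [← hms, h] at hp
    rw [← hp.length_eq] at hlen
    simp at hlen
    omega
  have hp : ms.Perm (pvMrep space (pvC space nums) (pvV space nums)) := by
    rw [hms]
    exact List.mergeSort_perm _ _
  have hy : ms.getLast hne ∈ pvMrep space (pvC space nums) (pvV space nums) :=
    hp.mem_iff.mp (List.getLast_mem hne)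
  rcases List.mem_map.mp hy with ⟨j, hjmem, hj⟩
  rw [PySem.List.mem_pyRange_one] at hjmem
  refine ⟨j, by omega, by omega, ?_, ?_⟩
  · rw [PySem.List.pyGet?_neg_one, List.getLast?_eq_some_getLast hne]
    show (ms.getLast hne).2.2 = pvV space nums j
    rw [← hj]
  · intro j' h0 h1
    have hentry : (j', pvC space nums j', pvV space nums j') ∈
        pvMrep space (pvC space nums) (pvV space nums) :=
      List.mem_map.mpr ⟨j', PySem.List.mem_pyRange_one.mpr ⟨by omega, by omega⟩, rfl⟩
    have hpw : ms.Pairwise (fun a b =>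
        (fun x => (toLex (x.2.1, -x.2.2) : Lex (Int × Int))) a
          ≤ (fun x => (toLex (x.2.1, -x.2.2) : Lex (Int × Int))) b) := by
      rw [hms]
      have := List.pairwise_mergeSort
        (le := fun (a b : Int × Int × Int) =>
          decide ((toLex (a.2.1, -a.2.2) : Lex (Int × Int)) ≤ toLex (b.2.1, -b.2.2)))
        (fun a b c hab hbc => by
          simp only [decide_eq_true_eq] at *
          exact le_trans hab hbc)
        (fun a b => by
          simp only [Bool.or_eq_true, decide_eq_true_eq]
          exact le_total _ _)
        (pvMrep space (pvC space nums) (pvV space nums))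
      exact this.imp (by simp)
    have hle := key_le_getLast (fun x => (toLex (x.2.1, -x.2.2) : Lex (Int × Int))) ms hne hpw
      (j', pvC space nums j', pvV space nums j')
      (hp.mem_iff.mpr hentry)
    rw [← hj] at hle
    exact hle

def pvMaxc (space : Int) (nums : List Int) : Int :=
  (PySem.List.max? (nums.map (fun n => pvC space nums (pvAdj space n))) (fun v => v)).getD 0

lemma B_eq (nums : List Int) (space : Int) (hs : 1 ≤ space) :
    destroyTargetsM_alt nums space =
      (PySem.List.min?
        (nums.filter (fun n => pvC space nums (pvAdj space n) == pvMaxc space nums))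
        (fun v => v)).getD 99999999999 := by
  unfold destroyTargetsM_alt pvMaxc
  have hmap : nums.map (fun n =>
      (nums.foldl (fun d n => d.modify (PySem.Int.mod n space) 0 (· + 1))
        (PySem.Dict.empty : PySem.Dict Int Int)).getD (PySem.Int.mod n space) 0)
      = nums.map (fun n => pvC space nums (pvAdj space n)) :=
    List.map_congr_left (fun n _ => counts_getD_eq nums space n hs)
  have hfil : nums.filter (fun n =>
      (nums.foldl (fun d n => d.modify (PySem.Int.mod n space) 0 (· + 1))
        (PySem.Dict.empty : PySem.Dict Int Int)).getD (PySem.Int.mod n space) 0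
        == (PySem.List.max? (nums.map (fun n => pvC space nums (pvAdj space n))) (fun v => v)).getD 0)
      = nums.filter (fun n => pvC space nums (pvAdj space n)
        == (PySem.List.max? (nums.map (fun n => pvC space nums (pvAdj space n))) (fun v => v)).getD 0) := by
    apply List.filter_congr
    intro n _
    rw [counts_getD_eq nums space n hs]
  simp only
  rw [hmap, hfil]

lemma B_empty (space : Int) : destroyTargetsM_alt [] space = 99999999999 := by
  rfl

lemma main_eq (nums : List Int) (space : Int)
    (hdom : ((nums.all (fun y0_ => (pvDomInt y0_))) && (pvDomInt space)) = true)
    (hpre : 1 ≤ space ∨ (nums = [] ∧ 0 ≤ space)) :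
    destroyTargetsM nums space = destroyTargetsM_alt nums space := by
  by_cases hnil : nums = []
  · subst hnil
    have hs0 : 0 ≤ space := by rcases hpre with h | ⟨_, h⟩ <;> omega
    rw [A_empty space hs0, B_empty]
  · have hs : 1 ≤ space := by
      rcases hpre with h | ⟨h, _⟩
      · exact h
      · exact absurd h hnil
    have hdoms : ∀ n ∈ nums, -2147483648 ≤ n ∧ n ≤ 2147483648 := by
      intro n hn
      simp only [Bool.and_eq_true, List.all_eq_true, pvDomInt, decide_eq_true_eq] at hdom
      exact hdom.1 n hn
    obtain ⟨jy, hj0, hj1, hAval, hmax⟩ := A_char nums space hs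
    rw [hAval, B_eq nums space hs]
    set M := pvMaxc space nums with hM
    have hmapne : nums.map (fun n => pvC space nums (pvAdj space n)) ≠ [] := by
      simpa using hnil
    obtain ⟨n0, hn0, hn0c⟩ : ∃ n0 ∈ nums, pvC space nums (pvAdj space n0) = M := by
      cases hmx : PySem.List.max? (nums.map (fun n => pvC space nums (pvAdj space n))) (fun v => v) with
      | none =>
        rw [PySem.List.max?_eq_none_iff] at hmx
        exact absurd hmx hmapne
      | some m =>
        have hmem := PySem.List.max?_mem hmx
        rcases List.mem_map.mp hmem with ⟨n0, hn0, hfn0⟩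
        refine ⟨n0, hn0, ?_⟩
        rw [hfn0, hM]
        unfold pvMaxc
        rw [hmx]
        rfl
    have hub : ∀ n ∈ nums, pvC space nums (pvAdj space n) ≤ M := by
      intro n hn
      cases hmx : PySem.List.max? (nums.map (fun n => pvC space nums (pvAdj space n))) (fun v => v) with
      | none =>
        rw [PySem.List.max?_eq_none_iff] at hmx
        exact absurd hmx hmapne
      | some m =>
        have hle := PySem.List.max?_isMax hmx (pvC space nums (pvAdj space n))
          (List.mem_map.mpr ⟨n, hn, rfl⟩)
        have hMm : M = m := by rw [hM]; unfold pvMaxc; rw [hmx]; rfl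
        rw [hMm]
        exact hle
    have hmemf : ∀ n ∈ nums, n ∈ nums.filter (fun m => pvAdj space m == pvAdj space n) := by
      intro n hn
      exact List.mem_filter.mpr ⟨hn, by simp⟩
    have hCpos : ∀ n ∈ nums, 1 ≤ pvC space nums (pvAdj space n) := by
      intro n hn
      have hpos : 0 < (nums.filter (fun m => pvAdj space m == pvAdj space n)).length :=
        List.length_pos_of_mem (hmemf n hn)
      unfold pvC
      omega
    have hM1 : 1 ≤ M := hn0c ▸ hCpos n0 hn0
    have hCjyle : pvC space nums jy ≤ M := by
      by_cases hz : pvC space nums jy ≤ 0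
      · omega
      · have hpos : 0 < (nums.filter (fun m => pvAdj space m == jy)).length := by
          unfold pvC at hz
          omega
        obtain ⟨m0, hm0⟩ := List.exists_mem_of_length_pos hpos
        have hmf := List.mem_filter.mp hm0
        have hadj : pvAdj space m0 = jy := by simpa using hmf.2
        calc pvC space nums jy = pvC space nums (pvAdj space m0) := by rw [hadj]
          _ ≤ M := hub m0 hmf.1
    have hb0 := pvAdj_bounds space n0 hs
    have hlex := hmax (pvAdj space n0) (by omega) (by omega)
    rw [hn0c, Prod.Lex.toLex_le_toLex] at hlex
    have hCjy : pvC space nums jy = M := by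
      rcases hlex with h | ⟨h, _⟩ <;> simp at h <;> omega
    have hVy_le : ∀ j, 0 ≤ j → j ≤ space → pvC space nums j = M →
        pvV space nums jy ≤ pvV space nums j := by
      intro j a b hc
      have hx := hmax j a b
      rw [Prod.Lex.toLex_le_toLex, hc, hCjy] at hx
      rcases hx with h | ⟨_, h⟩ <;> simp at h <;> omega
    cases hmn : PySem.List.min? (nums.filter (fun n => pvC space nums (pvAdj space n) == M))
        (fun v => v) with
    | none =>
      rw [PySem.List.min?_eq_none_iff] at hmn
      have hcontra : n0 ∈ nums.filter (fun n => pvC space nums (pvAdj space n) == M) :=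
        List.mem_filter.mpr ⟨hn0, by simp [hn0c]⟩
      rw [hmn] at hcontra
      simp at hcontra
    | some bm =>
      simp only [Option.getD_some]
      have hbmf := List.mem_filter.mp (PySem.List.min?_mem hmn)
      have hbmc : pvC space nums (pvAdj space bm) = M := by simpa using hbmf.2
      have hbb := pvAdj_bounds space bm hs
      have h1 : pvV space nums jy ≤ bm := by
        have h2 : pvV space nums (pvAdj space bm) ≤ bm :=
          foldl_min_le_mem _ _ _ (hmemf bm hbmf.1)
        exact le_trans (hVy_le _ (by omega) (by omega) hbmc) h2
      have h2 : bm ≤ pvV space nums jy := by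
        have hpos : 0 < (nums.filter (fun m => pvAdj space m == jy)).length := by
          have hge : (1 : Int) ≤ pvC space nums jy := by omega
          unfold pvC at hge
          omega
        obtain ⟨m1, hm1⟩ := List.exists_mem_of_length_pos hpos
        rcases foldl_min_mem_or (nums.filter (fun m => pvAdj space m == jy)) 99999999999 with
          hInf | hmem
        · exfalso
          have hle : (nums.filter (fun m => pvAdj space m == jy)).foldl min 99999999999 ≤ m1 :=
            foldl_min_le_mem _ _ _ hm1
          rw [hInf] at hle
          have hdm := hdoms m1 (List.mem_filter.mp hm1).1
          omega
        · have hVf := List.mem_filter.mp hmem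
          have hVadj : pvAdj space ((nums.filter (fun m => pvAdj space m == jy)).foldl min 99999999999) = jy := by
            simpa using hVf.2
          have hVF : pvV space nums jy ∈
              nums.filter (fun n => pvC space nums (pvAdj space n) == M) := by
            refine List.mem_filter.mpr ⟨hVf.1, ?_⟩
            unfold pvV
            rw [hVadj, hCjy]
            simp
          exact PySem.List.min?_isMin hmn _ hVF
      omega

-- ===== VERDICT (by name: the statement is the Claim_ definition above) =====
theorem destroyTargetsM_spec : Claim_equal_destroyTargetsM := by
  intro nums space hdom hpre
  unfold Spec_destroyTargetsM
  unfold Dom_destroyTargetsM at hdom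
  unfold Pre_destroyTargetsM at hpre
  exact main_eq nums space hdom hpre
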